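-- pv_equiv track=rewrite | github.com/prakrititz/Token-PruningNLP | src/type_analysis.py | categorize_tokens_heuristic
-- ===== SOURCE A (Python) =====
-- from typing import List, Tuple, Dict, Optional
--
-- SYMBOL = "Symbol"
--
-- INVOCATION = "Invocation"
--
-- IDENTIFIER = "Identifier"
--
-- STRUCTURE = "Structure"
--
-- STRUCTURE_KEYWORDS = {
--     "if", "else", "for", "while", "do", "switch", "case", "default",
--     "break", "continue", "return", "try", "catch", "finally", "throw",
--     "throws", "class", "interface", "extends", "implements", "new",
--     "import", "package", "public", "private", "protected", "static",
--     "final", "abstract", "synchronized", "volatile", "transient",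
--     "native", "strictfp", "assert", "enum", "instanceof", "super",
--     "this", "void", "boolean", "byte", "char", "short", "int",
--     "long", "float", "double",
-- }
--
-- SYMBOL_CHARS = set("={}()[];,.<>+-*/&|^~!?:%@#")
--
-- def tokenize_java_code(code: str) -> List[str]:
--     """
--     Simple tokenization of Java code preserving meaningful tokens.
--     Splits on whitespace and separates symbols from identifiers.
--     """
--     tokens = []
--     # Split by whitespace first
--     for part in code.split():
--         # Further split symbols from text
--         current = ""
--         for ch in part:
--             if ch in SYMBOL_CHARS:
--                 if current:
--                     tokens.append(current)
--                     current = ""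
--                 tokens.append(ch)
--             else:
--                 current += ch
--         if current:
--             tokens.append(current)
--     return tokens
--
-- def _is_method_call(tokens: List[str], idx: int) -> bool:
--     """Check if a token at idx is followed by '(' suggesting a method call."""
--     if idx + 1 < len(tokens) and tokens[idx + 1] == "(":
--         return True
--     return False
--
-- def _is_preceded_by_dot(tokens: List[str], idx: int) -> bool:
--     """Check if a token at idx is preceded by '.' suggesting member access."""
--     if idx > 0 and tokens[idx - 1] == ".":
--         return True
--     return False
--
-- def categorize_tokens_heuristic(code: str) -> List[Tuple[str, str]]:
--     """
--     Heuristic-based token categorization for when javalang fails.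
--     Less accurate but handles incomplete/unparsable code.
--
--     Returns:
--         List of (token_value, token_type) tuples.
--     """
--     tokens = tokenize_java_code(code)
--     categorized = []
--
--     for i, token in enumerate(tokens):
--         if not token.strip():
--             continue
--
--         # Check if it's a symbol
--         if all(ch in SYMBOL_CHARS for ch in token):
--             categorized.append((token, SYMBOL))
--         # Check if it's a structure keyword
--         elif token in STRUCTURE_KEYWORDS:
--             categorized.append((token, STRUCTURE))
--         # Check if it's a method invocation (identifier followed by '(')
--         elif _is_method_call(tokens, i):
--             categorized.append((token, INVOCATION))
--         # Check if preceded by dot (member access / invocation chain)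
--         elif _is_preceded_by_dot(tokens, i) and _is_method_call(tokens, i):
--             categorized.append((token, INVOCATION))
--         else:
--             categorized.append((token, IDENTIFIER))
--
--     return categorized
-- ===== SOURCE B (Python) =====
-- SYMBOL = "Symbol"
-- INVOCATION = "Invocation"
-- IDENTIFIER = "Identifier"
-- STRUCTURE = "Structure"
--
-- STRUCTURE_KEYWORDS = {
--     "if", "else", "for", "while", "do", "switch", "case", "default",
--     "break", "continue", "return", "try", "catch", "finally", "throw",
--     "throws", "class", "interface", "extends", "implements", "new",
--     "import", "package", "public", "private", "protected", "static",
--     "final", "abstract", "synchronized", "volatile", "transient",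
--     "native", "strictfp", "assert", "enum", "instanceof", "super",
--     "this", "void", "boolean", "byte", "char", "short", "int",
--     "long", "float", "double",
-- }
--
-- SYMBOL_CHARS = set("={}()[];,.<>+-*/&|^~!?:%@#")
--
--
-- def _kind(tok, nxt):
--     # tok is a word token (no symbol chars): keyword, call (next token is '('), or identifier
--     if tok in STRUCTURE_KEYWORDS:
--         return STRUCTURE
--     if nxt == "(":
--         return INVOCATION
--     return IDENTIFIER
--
--
-- def categorize_tokens_heuristic(code):
--     # One fused right-to-left scan: tokenize and classify at once, building the
--     # answer back-to-front.  Scanning backwards means the token to the RIGHT of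
--     # the current one (the only context the heuristic needs) has already been
--     # seen, so no token list, index lookahead or second pass is needed.
--     out = []
--     nxt = ""   # token immediately to the right of the current position
--     cur = []   # chars of the word token being read, in right-to-left order
--     for ch in reversed(code):
--         if ch in SYMBOL_CHARS:
--             if cur:
--                 tok = "".join(reversed(cur))
--                 out.append((tok, _kind(tok, nxt)))
--                 nxt = tok
--                 cur = []
--             out.append((ch, SYMBOL))
--             nxt = ch
--         elif ch.isspace():
--             if cur:
--                 tok = "".join(reversed(cur))
--                 out.append((tok, _kind(tok, nxt)))
--                 nxt = tok
--                 cur = []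
--         else:
--             cur.append(ch)
--     if cur:
--         tok = "".join(reversed(cur))
--         out.append((tok, _kind(tok, nxt)))
--     out.reverse()
--     return out
-- ===== Notes on version B (the rewrite author's own statement) =====
-- stated objective: alternative
-- what changed: A tokenizes in two staged passes (whitespace split, then per-part symbol splitting) and classifies in a third pass over the materialized token list with index lookahead (tokens[i+1]); B is one fused right-to-left scan over the raw string that classifies each token the moment it ends, using the already-classified token to its right as the lookahead context, so it builds the answer back-to-front with no token list, no indexing and no separate classification pass.
import Mathlib
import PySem

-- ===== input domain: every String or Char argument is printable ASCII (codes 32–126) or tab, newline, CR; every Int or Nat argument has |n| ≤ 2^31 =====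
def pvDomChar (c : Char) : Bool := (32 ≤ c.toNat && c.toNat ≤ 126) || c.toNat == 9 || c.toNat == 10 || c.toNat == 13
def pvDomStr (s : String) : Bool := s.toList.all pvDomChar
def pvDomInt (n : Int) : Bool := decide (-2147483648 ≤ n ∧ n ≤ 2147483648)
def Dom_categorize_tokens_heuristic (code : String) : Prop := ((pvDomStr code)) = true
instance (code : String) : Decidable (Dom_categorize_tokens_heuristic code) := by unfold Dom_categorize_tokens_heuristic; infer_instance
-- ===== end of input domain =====

-- B replaces A's staged pipeline (whitespace split, per-part symbol split, then a third
-- classification pass with index lookahead over the token list) by ONE fused right-to-left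
-- scan of the raw string that classifies each token as it ends, using the already-classified
-- token to its right as context (objective: alternative; same return value).

-- ===== PORT A =====
def pvSymChars : PySem.Set Char := PySem.Set.ofList
  ['=', '{', '}', '(', ')', '[', ']', ';', ',', '.', '<', '>', '+', '-', '*', '/', '&', '|', '^', '~', '!', '?', ':', '%', '@', '#']

def pvKeywords : PySem.Set String := PySem.Set.ofList
  ["if", "else", "for", "while", "do", "switch", "case", "default",
   "break", "continue", "return", "try", "catch", "finally", "throw",
   "throws", "class", "interface", "extends", "implements", "new",
   "import", "package", "public", "private", "protected", "static",
   "final", "abstract", "synchronized", "volatile", "transient",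
   "native", "strictfp", "assert", "enum", "instanceof", "super",
   "this", "void", "boolean", "byte", "char", "short", "int",
   "long", "float", "double"]

-- 'if current: tokens.append(current)' (A's flush idiom)
def pvFin (st : List (List Char) × List Char) : List (List Char) :=
  if !st.2.isEmpty then st.1 ++ [st.2] else st.1

-- A's tokenize_java_code: split on whitespace, then split symbols out of each part
def tokenize_java_code (code : String) : List (List Char) :=
  (PySem.Chars.split₀ code.toList).foldl
    (fun tokens part =>
      pvFin (part.foldl
        (fun (st : List (List Char) × List Char) ch =>
          if pvSymChars.contains ch then
            (pvFin st ++ [[ch]], [])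
          else (st.1, st.2 ++ [ch]))
        (tokens, [])))
    []

def pv_is_method_call (tokens : List (List Char)) (idx : Int) : Bool :=
  if idx + 1 < (tokens.length : Int) ∧ PySem.List.pyGet? tokens (idx + 1) = some ['('] then true
  else false

def pv_is_preceded_by_dot (tokens : List (List Char)) (idx : Int) : Bool :=
  if 0 < idx ∧ PySem.List.pyGet? tokens (idx - 1) = some ['.'] then true
  else false

def categorize_tokens_heuristic (code : String) : List (String × String) :=
  let tokens := tokenize_java_code code
  (PySem.List.enumerate tokens).foldl
    (fun categorized p =>
      if (PySem.Chars.strip p.2).isEmpty then categorized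
      else if p.2.all (fun ch => pvSymChars.contains ch) then
        categorized ++ [(String.ofList p.2, "Symbol")]
      else if pvKeywords.contains (String.ofList p.2) then
        categorized ++ [(String.ofList p.2, "Structure")]
      else if pv_is_method_call tokens p.1 then
        categorized ++ [(String.ofList p.2, "Invocation")]
      else if pv_is_preceded_by_dot tokens p.1 && pv_is_method_call tokens p.1 then
        categorized ++ [(String.ofList p.2, "Invocation")]
      else categorized ++ [(String.ofList p.2, "Identifier")])
    []

-- ===== PORT B =====
-- _kind(tok, nxt): word-token classification from the token to its right
def pvKindB (tok nxt : List Char) : String :=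
  if pvKeywords.contains (String.ofList tok) then "Structure"
  else if nxt == ['('] then "Invocation"
  else "Identifier"

-- loop body of B's reverse scan; state = (out, nxt, cur); cur holds the pending
-- word token's chars in right-to-left order ('.join(reversed(cur))' = cur.reverse)
def pvStepB (st : List (String × String) × List Char × List Char) (ch : Char) :
    List (String × String) × List Char × List Char :=
  if pvSymChars.contains ch then
    let st' := if !st.2.2.isEmpty then
        (st.1 ++ [(String.ofList st.2.2.reverse, pvKindB st.2.2.reverse st.2.1)],
         st.2.2.reverse, ([] : List Char))
      else st
    (st'.1 ++ [(String.ofList [ch], "Symbol")], [ch], [])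
  else if PySem.Chars.isspace ch then
    if !st.2.2.isEmpty then
      (st.1 ++ [(String.ofList st.2.2.reverse, pvKindB st.2.2.reverse st.2.1)],
       st.2.2.reverse, [])
    else st
  else (st.1, st.2.1, st.2.2 ++ [ch])

def categorize_tokens_heuristic_alt (code : String) : List (String × String) :=
  let st := code.toList.reverse.foldl pvStepB ([], [], [])
  let out := if !st.2.2.isEmpty then
      st.1 ++ [(String.ofList st.2.2.reverse, pvKindB st.2.2.reverse st.2.1)]
    else st.1
  out.reverse

-- ===== PRECONDITION & SPEC =====
def Spec_categorize_tokens_heuristic (code : String) (out : List (String × String)) : Prop := out = categorize_tokens_heuristic_alt code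
instance (code : String) (out : List (String × String)) : Decidable (Spec_categorize_tokens_heuristic code out) := by unfold Spec_categorize_tokens_heuristic; infer_instance

-- ===== CLAIM (what is proved, stated in full; the proofs are below) =====
def Claim_equal_categorize_tokens_heuristic : Prop := ∀ (code : String), Dom_categorize_tokens_heuristic code → Spec_categorize_tokens_heuristic code (categorize_tokens_heuristic code)

-- ===== LEMMAS AND PROOFS =====

-- reference recursion: the token stream A's tokenizer produces
def pvTokRec : List Char → List Char → List (List Char)
  | [], cur => if cur.isEmpty then [] else [cur]
  | c :: rest, cur =>
    if pvSymChars.contains c then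
      (if cur.isEmpty then [] else [cur]) ++ [c] :: pvTokRec rest []
    else if PySem.Chars.isspace c then
      (if cur.isEmpty then [] else [cur]) ++ pvTokRec rest []
    else pvTokRec rest (cur ++ [c])

-- reference classification: each token with the token to its right
def pvKindA (t nxt : List Char) : String :=
  if t.all (fun c => pvSymChars.contains c) then "Symbol" else pvKindB t nxt

def refClassify : List (List Char) → List (String × String)
  | [] => []
  | t :: rest => (String.ofList t, pvKindA t (rest.headD [])) :: refClassify rest

-- a "plain" char belongs inside a word token
def pvPlain (c : Char) : Bool := !pvSymChars.contains c && !PySem.Chars.isspace c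

-- one-char-at-a-time restatement of A's inner per-part loop
def pvScanStep (st : List (List Char) × List Char) (ch : Char) : List (List Char) × List Char :=
  if pvSymChars.contains ch then (pvFin st ++ [[ch]], [])
  else if PySem.Chars.isspace ch then (pvFin st, [])
  else (st.1, st.2 ++ [ch])

lemma pvSym_not_space (c : Char) (h : PySem.Chars.isspace c = true) :
    pvSymChars.contains c = false := by
  have hm : pvSymChars = ['=', '{', '}', '(', ')', '[', ']', ';', ',', '.', '<', '>', '+', '-', '*', '/', '&', '|', '^', '~', '!', '?', ':', '%', '@', '#'] := by rfl
  rw [hm]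
  by_contra hc
  have hmem : c ∈ (['=', '{', '}', '(', ')', '[', ']', ';', ',', '.', '<', '>', '+', '-', '*', '/', '&', '|', '^', '~', '!', '?', ':', '%', '@', '#'] : List Char) := by
    simpa using Bool.not_eq_false _ |>.mp hc |> List.contains_iff_mem.mp
  fin_cases hmem <;> simp [PySem.Chars.isspace] at h

lemma pvFin_eq (toks : List (List Char)) (cur : List Char) :
    pvFin (toks, cur) = toks ++ (if cur.isEmpty then [] else [cur]) := by
  by_cases h : cur.isEmpty <;> simp [pvFin, h]

lemma pvScan_eq (cs : List Char) : ∀ (toks : List (List Char)) (cur : List Char),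
    pvFin (cs.foldl pvScanStep (toks, cur)) = toks ++ pvTokRec cs cur := by
  induction cs with
  | nil => intro toks cur; simp [pvTokRec, pvFin_eq]
  | cons c rest ih =>
    intro toks cur
    by_cases h1 : pvSymChars.contains c
    · simp only [List.foldl_cons, pvScanStep, h1, if_pos, pvTokRec, ih, pvFin_eq]
      simp [List.append_assoc]
    · have h1' : c ∉ pvSymChars := fun hm => h1 (PySem.Set.contains_iff pvSymChars _ |>.mpr hm)
      by_cases h2 : PySem.Chars.isspace c
      · simp only [List.foldl_cons, pvScanStep, h1, h2]
        simp only [if_neg, if_pos, Bool.false_eq_true, not_false_iff]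
        rw [ih, pvFin_eq]
        simp [pvTokRec, h1', h2, List.append_assoc]
      · simp only [List.foldl_cons, pvScanStep, h1, h2]
        simp only [if_neg, Bool.false_eq_true, not_false_iff]
        rw [ih]
        simp [pvTokRec, h1', h2]

lemma pvGo_acc (cs : List Char) : ∀ (cur : List Char) (acc : List (List Char)),
    PySem.Chars.split₀.go cs cur acc = acc.reverse ++ PySem.Chars.split₀.go cs cur [] := by
  induction cs with
  | nil =>
    intro cur acc
    by_cases h : cur.isEmpty <;> simp [PySem.Chars.split₀.go, h]
  | cons c rest ih =>
    intro cur acc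
    by_cases h1 : PySem.Chars.isspace c
    · by_cases h2 : cur.isEmpty
      · simp only [PySem.Chars.split₀.go, h1, h2, if_pos]
        exact ih [] acc
      · simp only [PySem.Chars.split₀.go, h1, h2, if_pos, if_neg, Bool.false_eq_true,
          not_false_iff]
        rw [ih [] (cur.reverse :: acc), ih [] [cur.reverse]]
        simp
    · simp only [PySem.Chars.split₀.go, h1, Bool.false_eq_true, not_false_iff, if_neg]
      exact ih _ _

lemma pvGo_nospace (cs : List Char) : ∀ (cur : List Char) (acc : List (List Char)),
    cur.all (fun c => !PySem.Chars.isspace c) = true →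
    (∀ p ∈ acc, p.all (fun c => !PySem.Chars.isspace c) = true) →
    ∀ p ∈ PySem.Chars.split₀.go cs cur acc, p.all (fun c => !PySem.Chars.isspace c) = true := by
  induction cs with
  | nil =>
    intro cur acc hcur hacc p hp
    by_cases h : cur.isEmpty
    · simp only [PySem.Chars.split₀.go, h, if_pos] at hp
      exact hacc p (by simpa using hp)
    · simp only [PySem.Chars.split₀.go, h, if_neg, Bool.false_eq_true, not_false_iff] at hp
      simp only [List.mem_reverse, List.mem_cons] at hp
      rcases hp with h' | h'
      · subst h'; simpa using hcur
      · exact hacc p h'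
  | cons c rest ih =>
    intro cur acc hcur hacc p hp
    by_cases h1 : PySem.Chars.isspace c
    · by_cases h2 : cur.isEmpty
      · simp only [PySem.Chars.split₀.go, h1, h2, if_pos] at hp
        exact ih [] acc rfl hacc p hp
      · simp only [PySem.Chars.split₀.go, h1, h2, if_pos, if_neg, Bool.false_eq_true,
          not_false_iff] at hp
        refine ih [] (cur.reverse :: acc) rfl ?_ p hp
        intro q hq
        rcases List.mem_cons.mp hq with h' | h'
        · subst h'; simpa using hcur
        · exact hacc q h'
    · simp only [PySem.Chars.split₀.go, h1, Bool.false_eq_true, not_false_iff, if_neg] at hp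
      refine ih (c :: cur) acc ?_ hacc p hp
      simp [hcur, h1]

lemma pvTokRec_split (c : Char) (hc : PySem.Chars.isspace c = true) (v : List Char) :
    ∀ (u : List Char) (buf : List Char),
    pvTokRec (u ++ c :: v) buf = pvTokRec u buf ++ pvTokRec v [] := by
  intro u
  induction u with
  | nil =>
    intro buf
    have hns : c ∉ pvSymChars := by
      intro hm
      have h2 := PySem.Set.contains_iff pvSymChars _ |>.mpr hm
      rw [pvSym_not_space c hc] at h2
      exact Bool.false_ne_true h2
    simp only [List.nil_append]
    rw [pvTokRec, pvTokRec]
    by_cases h : buf.isEmpty <;> simp [hns, hc, h]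
  | cons a u ih =>
    intro buf
    simp only [List.cons_append]
    rw [pvTokRec, pvTokRec]
    by_cases h1 : pvSymChars.contains a
    · have h1' : a ∈ pvSymChars := PySem.Set.contains_iff pvSymChars _ |>.mp h1
      simp [h1', ih, List.append_assoc]
    · have h1' : a ∉ pvSymChars := fun hm => h1 (PySem.Set.contains_iff pvSymChars _ |>.mpr hm)
      by_cases h2 : PySem.Chars.isspace a
      · simp [h1', h2, ih, List.append_assoc]
      · simp [h1', h2, ih]

lemma pvGo_flat (cs : List Char) : ∀ (w : List Char),
    w.all (fun c => !PySem.Chars.isspace c) = true →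
    (PySem.Chars.split₀.go cs w.reverse []).flatMap (fun p => pvTokRec p []) =
      pvTokRec (w ++ cs) [] := by
  induction cs with
  | nil =>
    intro w hw
    by_cases h : w.isEmpty
    · have : w = [] := by simpa using h
      subst this
      simp [PySem.Chars.split₀.go, pvTokRec]
    · have h' : w.reverse.isEmpty = false := by
        simp only [List.isEmpty_reverse]; simpa using h
      simp [PySem.Chars.split₀.go, h']
  | cons c rest ih =>
    intro w hw
    by_cases h1 : PySem.Chars.isspace c
    · have h1' : c ∉ pvSymChars := by
        intro hm
        have h2 := PySem.Set.contains_iff pvSymChars _ |>.mpr hm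
        rw [pvSym_not_space c h1] at h2
        exact Bool.false_ne_true h2
      rw [pvTokRec_split c h1 rest w []]
      by_cases h2 : w.isEmpty
      · have hw0 : w = [] := by simpa using h2
        subst hw0
        simp only [PySem.Chars.split₀.go, h1, if_pos, List.reverse_nil, List.isEmpty_nil]
        simpa using ih [] rfl
      · have h2' : w.reverse.isEmpty = false := by
          simp only [List.isEmpty_reverse]; simpa using h2
        simp only [PySem.Chars.split₀.go, h1, h2', if_pos, Bool.false_eq_true, not_false_iff,
          if_neg]
        rw [pvGo_acc rest [] [w.reverse.reverse]]
        simp only [List.flatMap_append, List.reverse_cons, List.reverse_nil, List.nil_append,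
          List.flatMap_cons, List.flatMap_nil, List.reverse_reverse, List.append_nil]
        rw [show PySem.Chars.split₀.go rest [] [] =
              PySem.Chars.split₀.go rest ([] : List Char).reverse [] from rfl, ih [] rfl]
        simp
    · have e : c :: w.reverse = (w ++ [c]).reverse := by simp
      simp only [PySem.Chars.split₀.go, h1, Bool.false_eq_true, not_false_iff, if_neg]
      rw [e, ih (w ++ [c]) (by simp [hw, h1]), List.append_assoc]
      simp

lemma pvPart_eq (part : List Char)
    (hp : part.all (fun c => !PySem.Chars.isspace c) = true)
    (toks : List (List Char)) :
    pvFin (part.foldl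
      (fun (st : List (List Char) × List Char) ch =>
        if pvSymChars.contains ch then (pvFin st ++ [[ch]], [])
        else (st.1, st.2 ++ [ch]))
      (toks, [])) = toks ++ pvTokRec part [] := by
  rw [PySem.List.foldl_congr_mem part _ pvScanStep (toks, ([] : List Char)) ?_]
  · exact pvScan_eq part toks []
  · intro st ch hch
    have hns : PySem.Chars.isspace ch = false := by
      have := List.all_eq_true.mp hp ch hch
      simpa using this
    by_cases h : pvSymChars.contains ch <;> simp [pvScanStep, h, hns]

lemma pvTokA_eq (code : String) :
    tokenize_java_code code = pvTokRec code.toList [] := by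
  unfold tokenize_java_code
  have hws : ∀ p ∈ PySem.Chars.split₀ code.toList,
      p.all (fun c => !PySem.Chars.isspace c) = true := by
    intro p hp
    exact pvGo_nospace code.toList [] [] rfl (by intro q hq; cases hq) p hp
  rw [PySem.List.foldl_congr_mem _ _
      (fun toks part => toks ++ pvTokRec part []) [] ?_]
  · rw [PySem.List.foldl_append_eq_flatMap]
    have := pvGo_flat code.toList [] rfl
    simpa [PySem.Chars.split₀] using this
  · intro toks part hpart
    exact pvPart_eq part (hws part hpart) toks

lemma pvTokRec_good (cs : List Char) : ∀ (buf : List Char),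
    buf.all (fun c => !PySem.Chars.isspace c) = true →
    ∀ t ∈ pvTokRec cs buf, t ≠ [] ∧ t.all (fun c => !PySem.Chars.isspace c) = true := by
  induction cs with
  | nil =>
    intro buf hbuf t ht
    rw [pvTokRec] at ht
    by_cases hb : buf = []
    · simp [hb] at ht
    · simp [List.isEmpty_iff, hb] at ht
      subst ht
      exact ⟨hb, hbuf⟩
  | cons c rest ih =>
    intro buf hbuf t ht
    rw [pvTokRec] at ht
    by_cases h1 : pvSymChars.contains c
    · have hcs : PySem.Chars.isspace c = false := by
        by_contra hsp
        have h2 := pvSym_not_space c (by simpa using hsp)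
        rw [h1] at h2
        simp at h2
      have h1p : c ∈ pvSymChars := PySem.Set.contains_iff pvSymChars c |>.mp h1
      by_cases hb : buf = []
      · simp only [h1, if_pos, hb, List.isEmpty_nil, List.nil_append, List.mem_cons] at ht
        rcases ht with ht | ht
        · subst ht; exact ⟨by simp, by simp [hcs]⟩
        · exact ih [] rfl t ht
      · simp [h1, h1p, List.isEmpty_iff, hb] at ht
        rcases ht with ht | ht | ht
        · subst ht; exact ⟨hb, hbuf⟩
        · subst ht; exact ⟨by simp, by simp [hcs]⟩
        · exact ih [] rfl t ht
    · have h1n : c ∉ pvSymChars := fun hm => h1 (PySem.Set.contains_iff pvSymChars c |>.mpr hm)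
      by_cases h2 : PySem.Chars.isspace c
      · by_cases hb : buf = []
        · simp [h1n, h2, hb] at ht
          exact ih [] rfl t ht
        · simp [h1n, h2, List.isEmpty_iff, hb] at ht
          rcases ht with ht | ht
          · subst ht; exact ⟨hb, hbuf⟩
          · exact ih [] rfl t ht
      · simp [h1n, h2] at ht
        refine ih (buf ++ [c]) ?_ t ht
        simp [hbuf, h2]

lemma pvLstrip_id (t : List Char)
    (h2 : t.all (fun c => !PySem.Chars.isspace c) = true) :
    PySem.Chars.lstrip t = t := by
  unfold PySem.Chars.lstrip
  cases t with
  | nil => rfl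
  | cons a as =>
    rw [List.dropWhile_cons_of_neg]
    have := List.all_eq_true.mp h2 a (by simp)
    simpa using this

lemma pvStrip_ne (t : List Char) (h1 : t ≠ [])
    (h2 : t.all (fun c => !PySem.Chars.isspace c) = true) :
    (PySem.Chars.strip t).isEmpty = false := by
  unfold PySem.Chars.strip PySem.Chars.rstrip
  rw [pvLstrip_id t h2, show List.dropWhile PySem.Chars.isspace t.reverse
      = PySem.Chars.lstrip t.reverse from rfl, pvLstrip_id t.reverse (by simpa using h2)]
  simpa using h1

-- refClassify as a map over zipped lookahead pairs
lemma refClassify_zip (l : List (List Char)) :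
    refClassify l = (l.zip (l.drop 1 ++ [[]])).map
      (fun p => (String.ofList p.1, pvKindA p.1 p.2)) := by
  induction l with
  | nil => rfl
  | cons t rest ih =>
    cases rest with
    | nil => rfl
    | cons r rs =>
      rw [show refClassify (t :: r :: rs)
            = (String.ofList t, pvKindA t r) :: refClassify (r :: rs) from rfl, ih]
      rfl

-- A's classification pass produces refClassify of its token list
lemma pvClassifyA_eq (tokens : List (List Char))
    (hg : ∀ t ∈ tokens, t ≠ [] ∧ t.all (fun c => !PySem.Chars.isspace c) = true) :
    (PySem.List.enumerate tokens).foldl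
      (fun categorized p =>
        if (PySem.Chars.strip p.2).isEmpty then categorized
        else if p.2.all (fun ch => pvSymChars.contains ch) then
          categorized ++ [(String.ofList p.2, "Symbol")]
        else if pvKeywords.contains (String.ofList p.2) then
          categorized ++ [(String.ofList p.2, "Structure")]
        else if pv_is_method_call tokens p.1 then
          categorized ++ [(String.ofList p.2, "Invocation")]
        else if pv_is_preceded_by_dot tokens p.1 && pv_is_method_call tokens p.1 then
          categorized ++ [(String.ofList p.2, "Invocation")]
        else categorized ++ [(String.ofList p.2, "Identifier")])
      [] = refClassify tokens := by
  rw [PySem.List.foldl_congr_mem _ _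
      (fun categorized p => categorized ++
        [(String.ofList p.2,
          if p.2.all (fun ch => pvSymChars.contains ch) then "Symbol"
          else if pvKeywords.contains (String.ofList p.2) then "Structure"
          else if pv_is_method_call tokens p.1 then "Invocation"
          else if pv_is_preceded_by_dot tokens p.1 && pv_is_method_call tokens p.1 then
            "Invocation"
          else "Identifier")]) [] ?_]
  · rw [PySem.List.foldl_append_singleton_eq_map]
    rw [refClassify_zip]
    simp only [List.nil_append]
    apply List.ext_getElem
    · simp [PySem.List.length_enumerate, List.length_zip]
      omega
    · intro k h1 h2
      rw [List.getElem_map, List.getElem_map, PySem.List.getElem_enumerate, List.getElem_zip]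
      have hklen : k < tokens.length := by simpa [PySem.List.length_enumerate] using h1
      have hmc : pv_is_method_call tokens ((0 : Int) + ↑k)
          = ((tokens.drop 1 ++ [[]])[k]'(by simp; omega) == ['(']) := by
        unfold pv_is_method_call
        have harith : (0 : Int) + ↑k + 1 = ((k + 1 : Nat) : Int) := by push_cast; ring
        rw [harith, PySem.List.pyGet?_natCast]
        by_cases hlt : k + 1 < tokens.length
        · have hcast : ((k + 1 : Nat) : Int) < (tokens.length : Int) := by exact_mod_cast hlt
          have hget : (tokens.drop 1 ++ [[]])[k]'(by simp; omega)
              = tokens[k + 1]'hlt := by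
            rw [List.getElem_append_left (by simp; omega)]
            simp [List.getElem_drop]
          rw [hget]
          by_cases he : tokens[k + 1]'hlt = ['(']
          · rw [if_pos ⟨hcast, by rw [List.getElem?_eq_getElem hlt, he]⟩]
            simp [he]
          · rw [if_neg]
            · simp [he]
            · rintro ⟨-, hx⟩
              rw [List.getElem?_eq_getElem hlt] at hx
              exact he (by simpa using hx)
        · have hget : (tokens.drop 1 ++ [[]])[k]'(by simp; omega)
              = ([] : List Char) := by
            rw [List.getElem_append_right (by simp; omega)]
            simp
          rw [hget, if_neg]
          · simp
          · rintro ⟨hx, -⟩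
            exact hlt (by exact_mod_cast hx)
      simp only [hmc]
      unfold pvKindA pvKindB
      cases hb : ((tokens.drop 1 ++ [[]])[k]'(by simp; omega) == ['(']) <;>
        simp [hb]
  · intro acc p hp
    obtain ⟨j, hj, hpj⟩ := (PySem.List.mem_enumerate_iff tokens 0 p).mp hp
    have hmem : p.2 ∈ tokens := by rw [hpj]; exact List.getElem_mem _
    obtain ⟨hne, hns⟩ := hg p.2 hmem
    rw [if_neg (by simp [pvStrip_ne p.2 hne hns])]
    beta_reduce
    split_ifs <;> rfl

lemma pvPlain_sym (c : Char) (hp : pvPlain c = true) : pvSymChars.contains c = false := by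
  cases hc : pvSymChars.contains c
  · rfl
  · unfold pvPlain at hp; rw [hc] at hp; simp at hp

lemma pvPlain_space (c : Char) (hp : pvPlain c = true) : PySem.Chars.isspace c = false := by
  cases hc : PySem.Chars.isspace c
  · rfl
  · unfold pvPlain at hp; rw [hc] at hp; simp at hp

lemma pvPlain_not (c : Char) (hp : pvPlain c = false) (h1 : pvSymChars.contains c = false) :
    PySem.Chars.isspace c = true := by
  unfold pvPlain at hp; rw [h1] at hp; simpa using hp

-- pvTokRec with a pending plain buffer, in terms of takeWhile/dropWhile
lemma pvTokRec_buf (cs : List Char) : ∀ (buf : List Char),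
    pvTokRec cs buf =
      (if (buf ++ cs.takeWhile pvPlain).isEmpty then [] else [buf ++ cs.takeWhile pvPlain])
        ++ pvTokRec (cs.dropWhile pvPlain) [] := by
  induction cs with
  | nil =>
    intro buf
    rw [pvTokRec]
    simp [pvTokRec]
  | cons c cs ih =>
    intro buf
    by_cases hp : pvPlain c = true
    · have h1 := pvPlain_sym c hp
      have h1m : c ∉ pvSymChars := fun hm =>
        Bool.false_ne_true (h1 ▸ (PySem.Set.contains_iff pvSymChars c |>.mpr hm))
      have h2 := pvPlain_space c hp
      rw [pvTokRec]
      simp only [h1, h2, Bool.false_eq_true, if_neg, not_false_iff]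
      rw [ih (buf ++ [c]), List.takeWhile_cons_of_pos hp, List.dropWhile_cons_of_pos hp]
      simp
    · have hp' : pvPlain c = false := by simpa using hp
      rw [List.takeWhile_cons_of_neg (by simp [hp']),
          List.dropWhile_cons_of_neg (by simp [hp'])]
      by_cases h1 : pvSymChars.contains c = true
      · have h1m : c ∈ pvSymChars := PySem.Set.contains_iff pvSymChars c |>.mp h1
        rw [pvTokRec, show pvTokRec (c :: cs) [] =
            (if ([] : List Char).isEmpty then [] else [([] : List Char)])
              ++ [c] :: pvTokRec cs [] from by rw [pvTokRec]; simp [h1m]]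
        simp [h1m]
      · have h1f : pvSymChars.contains c = false := Bool.eq_false_iff.mpr h1
        have h1m : c ∉ pvSymChars := fun hm =>
          Bool.false_ne_true (h1f ▸ (PySem.Set.contains_iff pvSymChars c |>.mpr hm))
        have h2 : PySem.Chars.isspace c = true := pvPlain_not c hp' h1f
        rw [pvTokRec, show pvTokRec (c :: cs) [] = pvTokRec cs [] from by
            rw [pvTokRec]; simp [h1m, h2]]
        simp [h1m, h2]

lemma pvKindA_sym (c : Char) (n : List Char) (h : pvSymChars.contains c = true) :
    pvKindA [c] n = "Symbol" := by
  unfold pvKindA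
  simp only [List.all_cons, List.all_nil, Bool.and_true, h, if_true]

lemma pvKindA_plain (t : List Char) (n : List Char) (ht : t ≠ [])
    (hall : ∀ x ∈ t, pvPlain x = true) : pvKindA t n = pvKindB t n := by
  unfold pvKindA
  cases t with
  | nil => exact absurd rfl ht
  | cons a t =>
    have ha := pvPlain_sym a (hall a (by simp))
    have ham : a ∉ pvSymChars := fun hm =>
      Bool.false_ne_true (ha ▸ (PySem.Set.contains_iff pvSymChars a |>.mpr hm))
    simp [List.all_cons, ham]

-- how one pvStepB step acts, by case on the char and the pending buffer
lemma pvStepB_sym (c : Char) (out : List (String × String)) (nxt : List Char)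
    (h : pvSymChars.contains c = true) :
    pvStepB (out, nxt, []) c = (out ++ [(String.ofList [c], "Symbol")], [c], []) := by
  unfold pvStepB; rw [if_pos h]; simp

lemma pvStepB_sym_flush (c : Char) (out : List (String × String)) (nxt cur : List Char)
    (h : pvSymChars.contains c = true) (hc : cur ≠ []) :
    pvStepB (out, nxt, cur) c =
      ((out ++ [(String.ofList cur.reverse, pvKindB cur.reverse nxt)])
        ++ [(String.ofList [c], "Symbol")], [c], []) := by
  unfold pvStepB; rw [if_pos h]
  simp [List.isEmpty_eq_false_iff.mpr hc]

lemma pvStepB_space (c : Char) (out : List (String × String)) (nxt : List Char)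
    (h1 : pvSymChars.contains c = false) (h2 : PySem.Chars.isspace c = true) :
    pvStepB (out, nxt, []) c = (out, nxt, []) := by
  unfold pvStepB
  rw [if_neg (fun hx => Bool.false_ne_true (h1 ▸ hx)), if_pos h2]; simp

lemma pvStepB_space_flush (c : Char) (out : List (String × String)) (nxt cur : List Char)
    (h1 : pvSymChars.contains c = false) (h2 : PySem.Chars.isspace c = true) (hc : cur ≠ []) :
    pvStepB (out, nxt, cur) c =
      (out ++ [(String.ofList cur.reverse, pvKindB cur.reverse nxt)], cur.reverse, []) := by
  unfold pvStepB
  rw [if_neg (fun hx => Bool.false_ne_true (h1 ▸ hx)), if_pos h2]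
  simp [List.isEmpty_eq_false_iff.mpr hc]

lemma pvStepB_plain (c : Char) (out : List (String × String)) (nxt cur : List Char)
    (h1 : pvSymChars.contains c = false) (h2 : PySem.Chars.isspace c = false) :
    pvStepB (out, nxt, cur) c = (out, nxt, cur ++ [c]) := by
  unfold pvStepB
  rw [if_neg (fun hx => Bool.false_ne_true (h1 ▸ hx)),
      if_neg (fun hx => Bool.false_ne_true (h2 ▸ hx))]

-- B's reverse-scan invariant: after the (reversed) suffix cs, the state holds the
-- classified tokens of cs past its plain prefix (reversed), the leftmost such token,
-- and the pending plain prefix of cs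
lemma pvStepB_inv (cs : List Char) :
    cs.foldr (fun x y => pvStepB y x) ([], [], []) =
      ((refClassify (pvTokRec (cs.dropWhile pvPlain) [])).reverse,
       (pvTokRec (cs.dropWhile pvPlain) []).headD [],
       (cs.takeWhile pvPlain).reverse) := by
  induction cs with
  | nil => simp [pvTokRec, refClassify]
  | cons c cs ih =>
    rw [List.foldr_cons, ih]
    by_cases hp : pvPlain c = true
    · have h1 := pvPlain_sym c hp
      have h2 := pvPlain_space c hp
      rw [List.takeWhile_cons_of_pos hp, List.dropWhile_cons_of_pos hp,
          pvStepB_plain c _ _ _ h1 h2]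
      simp
    · have hp' : pvPlain c = false := by simpa using hp
      rw [List.takeWhile_cons_of_neg (by simp [hp']),
          List.dropWhile_cons_of_neg (by simp [hp'])]
      have htw : ∀ x ∈ cs.takeWhile pvPlain, pvPlain x = true :=
        fun x hx => List.mem_takeWhile_imp hx
      by_cases h1 : pvSymChars.contains c = true
      · have h1m : c ∈ pvSymChars := PySem.Set.contains_iff pvSymChars c |>.mp h1
        have htok : pvTokRec (c :: cs) [] = [c] :: pvTokRec cs [] := by
          rw [pvTokRec]; simp [h1m]
        rw [htok, pvTokRec_buf cs []]
        simp only [List.nil_append]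
        by_cases hT : (cs.takeWhile pvPlain).isEmpty
        · have hT' : cs.takeWhile pvPlain = [] := List.isEmpty_iff.mp hT
          rw [hT', List.reverse_nil, if_pos (by simp), List.nil_append,
              pvStepB_sym c _ _ h1,
              show refClassify ([c] :: pvTokRec (cs.dropWhile pvPlain) [])
                = (String.ofList [c],
                   pvKindA [c] ((pvTokRec (cs.dropWhile pvPlain) []).headD []))
                  :: refClassify (pvTokRec (cs.dropWhile pvPlain) []) from rfl,
              pvKindA_sym c _ h1]
          simp
        · have hTne : cs.takeWhile pvPlain ≠ [] := fun hx => by simp [hx] at hT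
          rw [if_neg (fun hx => hTne (List.isEmpty_iff.mp hx)), List.singleton_append,
              pvStepB_sym_flush c _ _ _ h1 (fun hx => hTne (by simpa using hx)),
              show refClassify ([c] :: (cs.takeWhile pvPlain
                  :: pvTokRec (cs.dropWhile pvPlain) []))
                = (String.ofList [c], pvKindA [c] (cs.takeWhile pvPlain))
                  :: (String.ofList (cs.takeWhile pvPlain),
                      pvKindA (cs.takeWhile pvPlain)
                        ((pvTokRec (cs.dropWhile pvPlain) []).headD []))
                  :: refClassify (pvTokRec (cs.dropWhile pvPlain) []) from rfl,
              pvKindA_sym c _ h1, pvKindA_plain _ _ hTne htw]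
          simp
      · have h1f : pvSymChars.contains c = false := Bool.eq_false_iff.mpr h1
        have h1m : c ∉ pvSymChars := fun hm =>
          Bool.false_ne_true (h1f ▸ (PySem.Set.contains_iff pvSymChars c |>.mpr hm))
        have h2 : PySem.Chars.isspace c = true := pvPlain_not c hp' h1f
        have htok : pvTokRec (c :: cs) [] = pvTokRec cs [] := by
          rw [pvTokRec]; simp [h1m, h2]
        rw [htok, pvTokRec_buf cs []]
        simp only [List.nil_append]
        by_cases hT : (cs.takeWhile pvPlain).isEmpty
        · have hT' : cs.takeWhile pvPlain = [] := List.isEmpty_iff.mp hT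
          rw [hT', List.reverse_nil, if_pos (by simp), List.nil_append,
              pvStepB_space c _ _ h1f h2]
        · have hTne : cs.takeWhile pvPlain ≠ [] := fun hx => by simp [hx] at hT
          rw [if_neg (fun hx => hTne (List.isEmpty_iff.mp hx)), List.singleton_append,
              pvStepB_space_flush c _ _ _ h1f h2 (fun hx => hTne (by simpa using hx)),
              show refClassify (cs.takeWhile pvPlain
                  :: pvTokRec (cs.dropWhile pvPlain) [])
                = (String.ofList (cs.takeWhile pvPlain),
                   pvKindA (cs.takeWhile pvPlain)
                     ((pvTokRec (cs.dropWhile pvPlain) []).headD []))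
                  :: refClassify (pvTokRec (cs.dropWhile pvPlain) []) from rfl,
              pvKindA_plain _ _ hTne htw]
          simp

lemma pvAltB_eq (code : String) :
    categorize_tokens_heuristic_alt code = refClassify (pvTokRec code.toList []) := by
  unfold categorize_tokens_heuristic_alt
  rw [List.foldl_reverse, pvStepB_inv, pvTokRec_buf code.toList []]
  simp only [List.nil_append]
  have htw : ∀ x ∈ code.toList.takeWhile pvPlain, pvPlain x = true :=
    fun x hx => List.mem_takeWhile_imp hx
  by_cases hT : (code.toList.takeWhile pvPlain).isEmpty
  · have hT' : code.toList.takeWhile pvPlain = [] := List.isEmpty_iff.mp hT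
    rw [hT']
    simp
  · have hTne : code.toList.takeWhile pvPlain ≠ [] := fun hx => by simp [hx] at hT
    have hTf : (code.toList.takeWhile pvPlain).reverse.isEmpty = false :=
      List.isEmpty_eq_false_iff.mpr (by simp [hTne])
    rw [if_pos (by rw [hTf]; rfl), if_neg (fun hx => hTne (List.isEmpty_iff.mp hx)),
        List.singleton_append,
        show refClassify (code.toList.takeWhile pvPlain
            :: pvTokRec (code.toList.dropWhile pvPlain) [])
          = (String.ofList (code.toList.takeWhile pvPlain),
             pvKindA (code.toList.takeWhile pvPlain)
               ((pvTokRec (code.toList.dropWhile pvPlain) []).headD []))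
            :: refClassify (pvTokRec (code.toList.dropWhile pvPlain) []) from rfl,
        pvKindA_plain _ _ hTne htw]
    simp [hTne]

-- ===== VERDICT (by name: the statement is the Claim_ definition above) =====
theorem categorize_tokens_heuristic_spec : Claim_equal_categorize_tokens_heuristic := by
  intro code _
  unfold Spec_categorize_tokens_heuristic categorize_tokens_heuristic
  rw [pvAltB_eq, pvTokA_eq]
  exact pvClassifyA_eq _ (pvTokRec_good _ _ rfl)
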